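-- pv_equiv track=rewrite | github.com/pypi-data/pypi-mirror-399 | packages/opsparser/opsparser-0.1.3.tar.gz/opsparser-0.1.3/opsparser/_manager/_BlockManager.py | _calculate_3d_nodes
-- ===== SOURCE A (Python) =====
-- from typing import Any, Optional, Dict, List
--
-- def _calculate_3d_nodes(nx: int, ny: int, nz: int, start_node: int) -> List[int]:
--     """Calculate generated node tags for 3D block
--
--     Args:
--         nx: Number of divisions in x direction
--         ny: Number of divisions in y direction
--         nz: Number of divisions in z direction
--         start_node: Starting node tag
--
--     Returns:
--         List of generated node tags
--     """
--     nodes = []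
--     for k in range(nz + 1):
--         for j in range(ny + 1):
--             for i in range(nx + 1):
--                 node_tag = start_node + k * (nx + 1) * (ny + 1) + j * (nx + 1) + i
--                 nodes.append(node_tag)
--     return nodes
-- ===== SOURCE B (Python) =====
-- from typing import List
--
-- def _calculate_3d_nodes(nx: int, ny: int, nz: int, start_node: int) -> List[int]:
--     count = max(nx + 1, 0) * max(ny + 1, 0) * max(nz + 1, 0)
--     return list(range(start_node, start_node + count))
-- ===== Notes on version B (the rewrite author's own statement) =====
-- stated objective: simpler
-- what changed: Replaces the triple nested loop with a closed-form node count (clamped product of the three dimensions) and a single range materialisation, since the generated tags are exactly a contiguous integer run.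
import Mathlib
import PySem

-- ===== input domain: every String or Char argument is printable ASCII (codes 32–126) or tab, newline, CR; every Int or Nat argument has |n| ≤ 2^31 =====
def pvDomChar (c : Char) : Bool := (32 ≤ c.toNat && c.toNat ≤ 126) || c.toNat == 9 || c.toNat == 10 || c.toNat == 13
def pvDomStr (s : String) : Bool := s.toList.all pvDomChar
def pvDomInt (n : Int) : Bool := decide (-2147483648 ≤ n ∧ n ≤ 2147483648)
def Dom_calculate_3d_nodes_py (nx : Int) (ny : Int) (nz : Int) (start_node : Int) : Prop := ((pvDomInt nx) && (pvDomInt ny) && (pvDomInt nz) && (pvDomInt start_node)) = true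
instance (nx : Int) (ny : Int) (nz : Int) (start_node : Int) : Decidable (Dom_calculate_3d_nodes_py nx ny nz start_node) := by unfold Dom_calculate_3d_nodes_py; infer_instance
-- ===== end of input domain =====

-- B replaces A's triple nested loop with a closed-form count (clamped product) and a single range; objective: simpler.


-- ===== PORT A =====
-- literal transliteration: three nested for-loops over range(..+1), appending node_tag
def calculate_3d_nodes_py (nx : Int) (ny : Int) (nz : Int) (start_node : Int) : List Int :=
  (PySem.List.pyRange 0 (nz + 1) 1).foldl (fun nodes k =>
    (PySem.List.pyRange 0 (ny + 1) 1).foldl (fun nodes j =>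
      (PySem.List.pyRange 0 (nx + 1) 1).foldl (fun nodes i =>
        nodes ++ [start_node + k * (nx + 1) * (ny + 1) + j * (nx + 1) + i]) nodes) nodes) []

-- ===== PORT B =====
-- literal transliteration of Source B: count = max(nx+1,0)*max(ny+1,0)*max(nz+1,0); list(range(start, start+count))
def calculate_3d_nodes_py_alt (nx : Int) (ny : Int) (nz : Int) (start_node : Int) : List Int :=
  PySem.List.pyRange start_node
    (start_node + max (nx + 1) 0 * max (ny + 1) 0 * max (nz + 1) 0) 1

-- ===== PRECONDITION & SPEC =====
def Spec_calculate_3d_nodes_py (nx : Int) (ny : Int) (nz : Int) (start_node : Int) (out : List Int) : Prop := out = calculate_3d_nodes_py_alt nx ny nz start_node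
instance (nx : Int) (ny : Int) (nz : Int) (start_node : Int) (out : List Int) : Decidable (Spec_calculate_3d_nodes_py nx ny nz start_node out) := by unfold Spec_calculate_3d_nodes_py; infer_instance

-- ===== CLAIM (what is proved, stated in full; the proofs are below) =====
def Claim_equal_calculate_3d_nodes_py : Prop := ∀ (nx : Int) (ny : Int) (nz : Int) (start_node : Int), Dom_calculate_3d_nodes_py nx ny nz start_node → Spec_calculate_3d_nodes_py nx ny nz start_node (calculate_3d_nodes_py nx ny nz start_node)

-- ===== LEMMAS AND PROOFS =====

-- shifting a based-at-0 range: map (b + ·) (range 0 n) = range b (b+n)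
theorem pv_map_shift (n b : Int) :
    (PySem.List.pyRange 0 n 1).map (fun i => b + i) = PySem.List.pyRange b (b + n) 1 := by
  rw [PySem.List.pyRange_one 0 n, PySem.List.pyRange_one b (b + n)]
  have h : b + n - b = n := by ring
  simp [List.map_map, h, Function.comp]

-- gluing m consecutive chunks of width s (Nat count)
theorem pv_chunk_nat (m : Nat) (b s : Int) (hs : 0 ≤ s) :
    (List.range m).flatMap (fun k : Nat => PySem.List.pyRange (b + (k : Int) * s) (b + (k : Int) * s + s) 1)
      = PySem.List.pyRange b (b + (m : Int) * s) 1 := by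
  induction m with
  | zero => simp [PySem.List.pyRange_one_eq_nil (le_refl b)]
  | succ m ih =>
    rw [List.range_succ, List.flatMap_append, ih]
    have h1 : b ≤ b + (m : Int) * s := by nlinarith
    have h2 : b + (m : Int) * s ≤ b + ((m : Int) + 1) * s := by nlinarith
    have h3 : b + (m : Int) * s + s = b + ((m : Int) + 1) * s := by ring
    simp only [List.flatMap_cons, List.flatMap_nil, List.append_nil, h3]
    push_cast
    rw [← PySem.List.pyRange_one_append b (b + (m : Int) * s) (b + ((m : Int) + 1) * s) h1 h2]

-- same gluing with an Int count n ≥ 0 running over pyRange 0 n 1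
theorem pv_chunk (n b s : Int) (hn : 0 ≤ n) (hs : 0 ≤ s) :
    (PySem.List.pyRange 0 n 1).flatMap (fun k => PySem.List.pyRange (b + k * s) (b + k * s + s) 1)
      = PySem.List.pyRange b (b + n * s) 1 := by
  rw [PySem.List.pyRange_one 0 n, List.flatMap_map]
  have h := pv_chunk_nat (n - 0).toNat b s hs
  have hcast : ((n - 0).toNat : Int) = n := by omega
  rw [hcast] at h
  rw [← h]
  simp

theorem calculate_3d_nodes_py_spec : Claim_equal_calculate_3d_nodes_py := by
  intro nx ny nz start_node _
  unfold Spec_calculate_3d_nodes_py calculate_3d_nodes_py calculate_3d_nodes_py_alt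
  simp only [PySem.List.foldl_append_singleton_eq_map, PySem.List.foldl_append_eq_flatMap,
    List.nil_append]
  by_cases hx : nx + 1 ≤ 0
  · have hmx : max (nx + 1) 0 = 0 := by omega
    simp [PySem.List.pyRange_one_eq_nil hx, hmx,
      PySem.List.pyRange_one_eq_nil (le_refl start_node)]
  · by_cases hy : ny + 1 ≤ 0
    · have hmy : max (ny + 1) 0 = 0 := by omega
      simp [PySem.List.pyRange_one_eq_nil hy, hmy,
        PySem.List.pyRange_one_eq_nil (le_refl start_node)]
    · by_cases hz : nz + 1 ≤ 0
      · have hmz : max (nz + 1) 0 = 0 := by omega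
        simp [PySem.List.pyRange_one_eq_nil hz, hmz,
          PySem.List.pyRange_one_eq_nil (le_refl start_node)]
      · rw [not_le] at hx hy hz
        have hx' : (0:Int) ≤ nx + 1 := le_of_lt hx
        have hy' : (0:Int) ≤ ny + 1 := le_of_lt hy
        have hz' : (0:Int) ≤ nz + 1 := le_of_lt hz
        have hmx : max (nx + 1) 0 = nx + 1 := by omega
        have hmy : max (ny + 1) 0 = ny + 1 := by omega
        have hmz : max (nz + 1) 0 = nz + 1 := by omega
        rw [hmx, hmy, hmz]
        have hinner : ∀ k j : Int,
            (PySem.List.pyRange 0 (nx + 1) 1).map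
              (fun i => start_node + k * (nx + 1) * (ny + 1) + j * (nx + 1) + i)
            = PySem.List.pyRange (start_node + k * ((nx + 1) * (ny + 1)) + j * (nx + 1))
                (start_node + k * ((nx + 1) * (ny + 1)) + j * (nx + 1) + (nx + 1)) 1 := by
          intro k j
          have := pv_map_shift (nx + 1) (start_node + k * (nx + 1) * (ny + 1) + j * (nx + 1))
          rw [this]
          ring_nf
        have hmid : ∀ k : Int,
            (PySem.List.pyRange 0 (ny + 1) 1).flatMap
              (fun j => (PySem.List.pyRange 0 (nx + 1) 1).map
                (fun i => start_node + k * (nx + 1) * (ny + 1) + j * (nx + 1) + i))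
            = PySem.List.pyRange (start_node + k * ((nx + 1) * (ny + 1)))
                (start_node + k * ((nx + 1) * (ny + 1)) + (ny + 1) * (nx + 1)) 1 := by
          intro k
          simp only [hinner]
          exact pv_chunk (ny + 1) (start_node + k * ((nx + 1) * (ny + 1))) (nx + 1) hy' hx'
        simp only [hmid]
        have houter := pv_chunk (nz + 1) start_node ((nx + 1) * (ny + 1)) hz'
          (by positivity)
        have hshape : ∀ k : Int,
            start_node + k * ((nx + 1) * (ny + 1)) + (ny + 1) * (nx + 1)
            = start_node + k * ((nx + 1) * (ny + 1)) + (nx + 1) * (ny + 1) := by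
          intro k; ring
        simp only [hshape]
        rw [houter]
        have : (nz + 1) * ((nx + 1) * (ny + 1)) = (nx + 1) * (ny + 1) * (nz + 1) := by ring
        rw [this]
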